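-- pv_equiv track=rewrite | github.com/PlethoraChutney/Advent-of-Code | 2024/day-12/day-12.py | get_region_cost
-- ===== SOURCE A (Python) =====
-- def n_coords(coord:tuple[int]) -> list[tuple[int]]:
--     x, y = coord
--     return [
--         (x + 1, y),
--         (x - 1, y),
--         (x, y + 1),
--         (x, y - 1)
--     ]
--
-- def get_region_cost(region_coords:set[tuple[int]]) -> int:
--     area = len(region_coords)
--     perim = 0
--     for square in region_coords:
--         perim += 4
--         for neighbor in n_coords(square):
--             if neighbor in region_coords:
--                 perim -= 1
--
--     return area * perim
-- ===== SOURCE B (Python) =====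
-- def cell_edges(coord):
--     x, y = coord
--     return [
--         (x, y, 'H'),
--         (x, y + 1, 'H'),
--         (x, y, 'V'),
--         (x + 1, y, 'V'),
--     ]
--
-- def get_region_cost(region_coords):
--     counts = {}
--     for square in region_coords:
--         for edge in cell_edges(square):
--             counts[edge] = counts.get(edge, 0) + 1
--     perimeter = sum(1 for c in counts.values() if c == 1)
--     return len(region_coords) * perimeter
-- ===== Notes on version B (the rewrite author's own statement) =====
-- stated objective: alternative
-- what changed: B never tests region membership: it builds a dict counting unit edge segments (each cell contributes its 4 boundary segments), takes the perimeter as the number of segments occurring exactly once (interior segments occur twice), and multiplies by the area.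
import Mathlib
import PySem

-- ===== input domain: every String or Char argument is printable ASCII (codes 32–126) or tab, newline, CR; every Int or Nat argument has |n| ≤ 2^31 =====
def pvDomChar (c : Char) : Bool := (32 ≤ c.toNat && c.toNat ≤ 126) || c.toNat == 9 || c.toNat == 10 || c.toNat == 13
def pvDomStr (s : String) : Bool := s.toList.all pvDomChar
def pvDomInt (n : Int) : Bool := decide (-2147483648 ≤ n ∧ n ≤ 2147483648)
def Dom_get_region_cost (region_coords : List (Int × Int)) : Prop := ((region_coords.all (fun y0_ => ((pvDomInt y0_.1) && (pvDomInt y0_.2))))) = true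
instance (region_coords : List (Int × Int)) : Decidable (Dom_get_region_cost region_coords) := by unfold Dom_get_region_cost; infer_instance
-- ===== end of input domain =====

-- B replaces A's per-cell membership-test perimeter loop by a dict of unit edge segments:
-- perimeter = number of segments occurring exactly once (objective: alternative).


-- ===== PORT A =====
def n_coords (coord : Int × Int) : List (Int × Int) :=
  [(coord.1 + 1, coord.2), (coord.1 - 1, coord.2), (coord.1, coord.2 + 1), (coord.1, coord.2 - 1)]

def get_region_cost (region_coords : List (Int × Int)) : Int :=
  let area : Int := region_coords.length
  let perim : Int := region_coords.foldl
    (fun perim square =>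
      (n_coords square).foldl
        (fun perim neighbor => if neighbor ∈ region_coords then perim - 1 else perim)
        (perim + 4))
    0
  area * perim

-- ===== PORT B =====
def cell_edges (coord : Int × Int) : List (Int × Int × String) :=
  [(coord.1, coord.2, "H"), (coord.1, coord.2 + 1, "H"),
   (coord.1, coord.2, "V"), (coord.1 + 1, coord.2, "V")]

def get_region_cost_alt (region_coords : List (Int × Int)) : Int :=
  let counts : PySem.Dict (Int × Int × String) Int :=
    region_coords.foldl
      (fun counts square =>
        (cell_edges square).foldl
          (fun counts edge => counts.insert edge (counts.getD edge 0 + 1))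
          counts)
      PySem.Dict.empty
  let perimeter : Int := counts.values.foldl (fun acc c => if c == 1 then acc + 1 else acc) 0
  (region_coords.length : Int) * perimeter

-- ===== PRECONDITION & SPEC =====
-- The Python parameter is a set of coordinate pairs, so per the type convention the list
-- holds DISTINCT elements; Pre_ states exactly that (no input A accepts is excluded).
def Pre_get_region_cost (region_coords : List (Int × Int)) : Prop := region_coords.Nodup
instance (region_coords : List (Int × Int)) : Decidable (Pre_get_region_cost region_coords) := by unfold Pre_get_region_cost; infer_instance
def pvWitness_get_region_cost : (List (Int × Int)) := [(0, 0), (1, 0), (1, 1)]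
def Spec_get_region_cost (region_coords : List (Int × Int)) (out : Int) : Prop := out = get_region_cost_alt region_coords
instance (region_coords : List (Int × Int)) (out : Int) : Decidable (Spec_get_region_cost region_coords out) := by unfold Spec_get_region_cost; infer_instance

-- ===== CLAIM (what is proved, stated in full; the proofs are below) =====
def Claim_equal_get_region_cost : Prop := ∀ (region_coords : List (Int × Int)), Dom_get_region_cost region_coords → Pre_get_region_cost region_coords → Spec_get_region_cost region_coords (get_region_cost region_coords)

-- ===== LEMMAS AND PROOFS =====

-- per-cell contribution of A's loop: 4 minus the number of neighbors (all four directions) in the region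
def cellA (R : List (Int × Int)) (s : Int × Int) : Int :=
  4 - ((if (s.1 + 1, s.2) ∈ R then (1:Int) else 0) + (if (s.1 - 1, s.2) ∈ R then 1 else 0)
     + (if (s.1, s.2 + 1) ∈ R then 1 else 0) + (if (s.1, s.2 - 1) ∈ R then 1 else 0))

theorem foldA_eq_sum (R l : List (Int × Int)) (init : Int) :
    l.foldl (fun perim square =>
        (n_coords square).foldl
          (fun perim neighbor => if neighbor ∈ R then perim - 1 else perim)
          (perim + 4)) init
      = init + (l.map (cellA R)).sum := by
  induction l generalizing init with
  | nil => simp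
  | cons a l ih =>
    simp only [List.foldl_cons, List.map_cons, List.sum_cons, ih]
    have : (n_coords a).foldl
        (fun perim neighbor => if neighbor ∈ R then perim - 1 else perim) (init + 4)
        = init + cellA R a := by
      simp only [n_coords, List.foldl_cons, List.foldl_nil, cellA]
      split_ifs <;> ring
    rw [this]; ring

-- B's double loop is a single counting loop over the flattened token list
theorem foldB_flatMap (l : List (Int × Int)) (d : PySem.Dict (Int × Int × String) Int) :
    l.foldl (fun counts square =>
        (cell_edges square).foldl
          (fun counts edge => counts.insert edge (counts.getD edge 0 + 1)) counts) d
      = (l.flatMap cell_edges).foldl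
          (fun counts edge => counts.insert edge (counts.getD edge 0 + 1)) d := by
  induction l generalizing d with
  | nil => simp
  | cons a l ih => simp [List.flatMap_cons, List.foldl_append, ih]

-- the multiplicity of an edge token among the region's tokens
theorem count_token_V (R : List (Int × Int)) (a b : Int) :
    (R.flatMap cell_edges).count (a, b, "V") = R.count (a, b) + R.count (a - 1, b) := by
  induction R with
  | nil => simp
  | cons c t ih =>
    simp [List.flatMap_cons, ih, cell_edges, List.count_cons, Prod.ext_iff]
    split_ifs <;> omega
theorem count_token_H (R : List (Int × Int)) (a b : Int) :
    (R.flatMap cell_edges).count (a, b, "H") = R.count (a, b) + R.count (a, b - 1) := by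
  induction R with
  | nil => simp
  | cons c t ih =>
    simp [List.flatMap_cons, ih, cell_edges, List.count_cons, Prod.ext_iff]
    split_ifs <;> omega

-- counting a once-only predicate over the distinct elements equals counting it over the list
theorem countP_ofList_of_once {α : Type} [BEq α] [LawfulBEq α] (T : List α) (p : α → Bool)
    (h : ∀ e ∈ T, p e = true → T.count e = 1) :
    (PySem.Set.ofList T).countP p = T.countP p := by
  rw [List.countP_eq_length_filter, List.countP_eq_length_filter]
  have hperm : ((PySem.Set.ofList T).filter p).Perm (T.filter p) := by
    rw [List.perm_ext_iff_of_nodup]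
    · intro a
      simp only [List.mem_filter, PySem.Set.mem_ofList]
    · exact (PySem.Set.nodup_ofList T).filter p
    · rw [List.nodup_iff_count_le_one]
      intro a
      by_cases hm : a ∈ T.filter p
      · have hp : p a = true := (List.mem_filter.mp hm).2
        have := h a (List.mem_filter.mp hm).1 hp
        calc (T.filter p).count a ≤ T.count a := (List.filter_sublist).count_le a
          _ = 1 := this
      · simp [List.count_eq_zero_of_not_mem hm]
  exact hperm.length_eq

-- countP distributes over flatMap as a sum
theorem countP_flatMap_sum {α β : Type} (l : List α) (g : α → List β) (p : β → Bool) :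
    ((l.flatMap g).countP p : Int) = (l.map (fun s => ((g s).countP p : Int))).sum := by
  induction l with
  | nil => simp
  | cons a t ih =>
    simp only [List.flatMap_cons, List.countP_append, List.map_cons, List.sum_cons]
    push_cast
    rw [ih]

theorem count_nodup_mem {α : Type} [BEq α] [LawfulBEq α] {R : List α} (h : R.Nodup) (a : α) :
    R.count a = if a ∈ R then 1 else 0 := by
  split_ifs with hm
  · exact List.count_eq_one_of_mem h hm
  · exact List.count_eq_zero_of_not_mem hm

-- the key pointwise fact: for s in a Nodup region, the number of s's edge tokens that are
-- globally unique is exactly A's per-cell contribution 4 - (#neighbors in R)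
theorem cell_countP (R : List (Int × Int)) (hnd : R.Nodup) (s : Int × Int) (hs : s ∈ R) :
    ((cell_edges s).countP (fun e => (R.flatMap cell_edges).count e == 1) : Int) = cellA R s := by
  have hcV : ∀ a b : Int, (R.flatMap cell_edges).count (a, b, "V")
      = (if (a, b) ∈ R then 1 else 0) + (if (a - 1, b) ∈ R then 1 else 0) := by
    intro a b; rw [count_token_V, count_nodup_mem hnd, count_nodup_mem hnd]
  have hcH : ∀ a b : Int, (R.flatMap cell_edges).count (a, b, "H")
      = (if (a, b) ∈ R then 1 else 0) + (if (a, b - 1) ∈ R then 1 else 0) := by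
    intro a b; rw [count_token_H, count_nodup_mem hnd, count_nodup_mem hnd]
  have hsmem : (if (s.1, s.2) ∈ R then (1:Nat) else 0) = 1 := by simp [hs]
  simp only [cell_edges, List.countP_cons, List.countP_nil]
  rw [show ((s.1, s.2 + 1, "H") : Int × Int × String) = (s.1, (s.2 + 1), "H") from rfl]
  have e1 := hcH s.1 s.2
  have e2 := hcH s.1 (s.2 + 1)
  have e3 := hcV s.1 s.2
  have e4 := hcV (s.1 + 1) s.2
  simp only [add_sub_cancel_right] at e2 e4
  rw [e1, e2, e3, e4]
  unfold cellA
  simp only [hsmem]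
  by_cases h1 : (s.1 + 1, s.2) ∈ R <;> by_cases h2 : (s.1 - 1, s.2) ∈ R <;>
    by_cases h3 : (s.1, s.2 + 1) ∈ R <;> by_cases h4 : (s.1, s.2 - 1) ∈ R <;>
    simp [h1, h2, h3, h4]

-- B's perimeter equals the sum of A's per-cell contributions
theorem perimB_eq (R : List (Int × Int)) (hnd : R.Nodup) :
    ((PySem.Dict.counter (R.flatMap cell_edges)).values.foldl
        (fun acc c => if c == 1 then acc + 1 else acc) 0 : Int)
      = (R.map (cellA R)).sum := by
  rw [PySem.List.foldl_beq_add_one, zero_add, List.count_eq_countP]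
  rw [show (PySem.Dict.counter (R.flatMap cell_edges)).values
      = ((PySem.Dict.counter (R.flatMap cell_edges)).items).map (·.2) from rfl]
  rw [PySem.Dict.items_counter, List.map_map, List.countP_map]
  have hp : ((fun x => x == (1:Int)) ∘ ((fun p => p.2) ∘ fun k => (k, ((R.flatMap cell_edges).count k : Int))))
      = fun e => (R.flatMap cell_edges).count e == 1 := by
    funext e
    simp only [Function.comp]
    rw [show (((R.flatMap cell_edges).count e : Int) == 1) = ((R.flatMap cell_edges).count e == 1) by
      by_cases h : (R.flatMap cell_edges).count e = 1 <;> simp [h]]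
  rw [hp, countP_ofList_of_once (R.flatMap cell_edges)
        (fun e => (R.flatMap cell_edges).count e == 1)
        (by intro e _ hpe; simpa using hpe)]
  rw [countP_flatMap_sum]
  exact congrArg List.sum (List.map_congr_left (fun s hs => cell_countP R hnd s hs))

-- ===== VERDICT (by name: the statement is the Claim_ definition above) =====
theorem get_region_cost_spec : Claim_equal_get_region_cost := by
  intro R _ hpre
  unfold Spec_get_region_cost get_region_cost get_region_cost_alt
  simp only [foldB_flatMap, PySem.Dict.foldl_insert_getD_add_one_eq_counter,
    foldA_eq_sum, zero_add]
  rw [perimB_eq R hpre]
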